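-- pv_equiv track=rewrite | github.com/ielab/OpenBioLLM | openbiollm/src/agents/eutils_agent/component.py | is_duplicate_params
-- ===== SOURCE A (Python) =====
-- from typing import Dict, Any, List
--
-- def is_duplicate_params(new_params: Dict[str, Any], used_params: List[Dict[str, Any]]) -> bool:
--     """
--     Check if parameters are duplicate
--     Rules:
--     1. esearch stage: check if db and term are the same as any previous round
--     2. efetch stage: check if db and id are the same as any previous round
--     3. two stages are independent of each other
--     """
--     # Check which stage we are in
--     is_esearch = 'term' in new_params
--     is_efetch = 'id' in new_params
--
--     for old_params in used_params:
--         # Check if database is the same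
--         if new_params.get('db') != old_params.get('db'):
--             continue
--
--         # esearch stage: check term
--         if is_esearch and 'term' in old_params:
--             if new_params['term'] == old_params['term']:
--                 return True
--
--         # efetch stage: check id
--         if is_efetch and 'id' in old_params:
--             new_ids = set(new_params['id'].split(','))
--             old_ids = set(old_params['id'].split(','))
--             if new_ids == old_ids:
--                 return True
--
--     return False
-- ===== SOURCE B (Python) =====
-- def is_duplicate_params(new_params, used_params):
--     """Canonicalize every round (new and old alike) through one normalization
--     function into tagged signature values, then decide by set disjointness."""
--     def signatures(params):
--         sigs = set()
--         if 'term' in params: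
--             sigs.add(('term', params.get('db'), params['term']))
--         if 'id' in params:
--             sigs.add(('id', params.get('db'), frozenset(params['id'].split(','))))
--         return sigs
--
--     seen = set()
--     for old in used_params:
--         seen.update(signatures(old))
--     return not signatures(new_params).isdisjoint(seen)
-- ===== Notes on version B (the rewrite author's own statement) =====
-- stated objective: alternative
-- what changed: Replaces A's asymmetric branch-heavy comparison scan with a symmetric normalize-then-intersect algorithm: one signatures() function canonicalizes every round (new and old treated identically) into tagged ('term',db,term)/('id',db,frozenset) values, all old signatures are accumulated into one set, and the answer is a single set-disjointness test.
import Mathlib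
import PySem

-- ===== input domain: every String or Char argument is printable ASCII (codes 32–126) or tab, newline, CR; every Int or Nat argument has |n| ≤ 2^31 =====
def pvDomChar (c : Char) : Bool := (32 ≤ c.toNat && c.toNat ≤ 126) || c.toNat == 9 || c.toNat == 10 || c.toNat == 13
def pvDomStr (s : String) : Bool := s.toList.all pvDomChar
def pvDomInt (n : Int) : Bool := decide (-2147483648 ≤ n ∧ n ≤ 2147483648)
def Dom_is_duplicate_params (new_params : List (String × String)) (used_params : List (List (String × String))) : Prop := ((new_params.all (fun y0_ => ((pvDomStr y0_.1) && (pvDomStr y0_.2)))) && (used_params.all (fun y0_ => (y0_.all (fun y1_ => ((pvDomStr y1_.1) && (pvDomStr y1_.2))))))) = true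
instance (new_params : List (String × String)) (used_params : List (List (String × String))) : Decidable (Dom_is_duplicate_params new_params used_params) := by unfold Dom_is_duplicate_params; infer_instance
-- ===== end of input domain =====

-- B replaces A's asymmetric branchy comparison scan with a symmetric normalize-then-intersect
-- algorithm: one signatures() function canonicalizes every round, the answer is a disjointness test.

-- shared helpers: a dict is an association list, lookup = first match
-- d.get(k) (None -> none)
def pvGet (d : List (String × String)) (k : String) : Option String :=
  (d.find? (fun q => q.1 == k)).map (·.2)

-- 'k' in d
def pvHas (d : List (String × String)) (k : String) : Bool :=
  d.any (fun q => q.1 == k)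

-- s.split(',') : the separator is the non-empty literal ",", so Str.split? never
-- returns none here and getD [] is exact
def pvSplitComma (s : String) : List String :=
  (PySem.Str.split? s ",").getD []

-- ===== PORT A =====
-- the for-loop with early return True / fall-through to False
def pvALoop (new_params : List (String × String)) (is_esearch is_efetch : Bool) :
    List (List (String × String)) → Bool
  | [] => false
  | old :: rest =>
    if pvGet new_params "db" ≠ pvGet old "db" then
      pvALoop new_params is_esearch is_efetch rest
    else if is_esearch && pvHas old "term" &&
        (pvGet new_params "term" == pvGet old "term") then true
    else if is_efetch && pvHas old "id" &&
        PySem.Set.equal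
          (PySem.Set.ofList (pvSplitComma ((pvGet new_params "id").getD "")))
          (PySem.Set.ofList (pvSplitComma ((pvGet old "id").getD ""))) then true
    else pvALoop new_params is_esearch is_efetch rest

def is_duplicate_params (new_params : List (String × String)) (used_params : List (List (String × String))) : Bool :=
  pvALoop new_params (pvHas new_params "term") (pvHas new_params "id") used_params

-- ===== PORT B =====
-- Python's frozenset(s.split(',')) is ported as the canonical sorted list of the distinct
-- split pieces: exact, since frozensets are compared (and used as set members) only up to
-- set equality, and two duplicate-free string lists are equal as sets iff their sorted
-- forms coincide.
def pvFroz (s : String) : List String :=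
  PySem.List.sorted (PySem.Set.ofList (pvSplitComma s)) (fun x => x) false

-- a signature tuple ('term', db, term) / ('id', db, frozenset); the heterogeneous third
-- component is carried by the constructor, which also carries the 'term'/'id' tag
inductive PvSig : Type
  | term : Option String → String → PvSig
  | ids : Option String → List String → PvSig
deriving DecidableEq

-- signatures(params): the canonical signature set of ONE round (new or old alike)
def pvSignatures (params : List (String × String)) : PySem.Set PvSig :=
  let sigs : PySem.Set PvSig := PySem.Set.empty
  let sigs := if pvHas params "term" then
      PySem.Set.add sigs (.term (pvGet params "db") ((pvGet params "term").getD "")) else sigs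
  let sigs := if pvHas params "id" then
      PySem.Set.add sigs (.ids (pvGet params "db") (pvFroz ((pvGet params "id").getD ""))) else sigs
  sigs

def is_duplicate_params_alt (new_params : List (String × String)) (used_params : List (List (String × String))) : Bool :=
  let seen : PySem.Set PvSig :=
    used_params.foldl (fun seen old => PySem.Set.update seen (pvSignatures old)) PySem.Set.empty
  !(PySem.Set.isdisjoint (pvSignatures new_params) seen)

-- ===== PRECONDITION & SPEC =====
def Spec_is_duplicate_params (new_params : List (String × String)) (used_params : List (List (String × String))) (out : Bool) : Prop := out = is_duplicate_params_alt new_params used_params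
instance (new_params : List (String × String)) (used_params : List (List (String × String))) (out : Bool) : Decidable (Spec_is_duplicate_params new_params used_params out) := by unfold Spec_is_duplicate_params; infer_instance

-- ===== CLAIM (what is proved, stated in full; the proofs are below) =====
def Claim_equal_is_duplicate_params : Prop := ∀ (new_params : List (String × String)) (used_params : List (List (String × String))), Dom_is_duplicate_params new_params used_params → Spec_is_duplicate_params new_params used_params (is_duplicate_params new_params used_params)

-- ===== LEMMAS AND PROOFS =====

-- the per-round test A performs, as one boolean
def pvPredA (new_params : List (String × String)) (is_esearch is_efetch : Bool)
    (old : List (String × String)) : Bool :=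
  (pvGet new_params "db" == pvGet old "db") &&
  ((is_esearch && pvHas old "term" && (pvGet new_params "term" == pvGet old "term")) ||
   (is_efetch && pvHas old "id" &&
     PySem.Set.equal
       (PySem.Set.ofList (pvSplitComma ((pvGet new_params "id").getD "")))
       (PySem.Set.ofList (pvSplitComma ((pvGet old "id").getD "")))))

theorem pvALoop_eq_any (new_params : List (String × String)) (es ef : Bool)
    (used : List (List (String × String))) :
    pvALoop new_params es ef used = used.any (pvPredA new_params es ef) := by
  induction used with
  | nil => simp [pvALoop]
  | cons old rest ih =>
    rw [List.any_cons, ← ih]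
    rcases eq_or_ne (pvGet new_params "db") (pvGet old "db") with h1 | h1
    · simp only [pvALoop, pvPredA, h1, ne_eq, not_true_eq_false, if_false,
        beq_self_eq_true, Bool.true_and]
      split_ifs with h2 h3 <;> simp_all
    · simp [pvALoop, pvPredA, h1]

theorem pvHas_iff (d : List (String × String)) (k : String) :
    pvHas d k = true ↔ ∃ v, pvGet d k = some v := by
  simp only [pvHas, pvGet, List.any_eq_true, Option.map_eq_some_iff]
  constructor
  · rintro ⟨p, hp, hk⟩
    have hs : (d.find? (fun q => q.1 == k)).isSome := List.find?_isSome.mpr ⟨p, hp, hk⟩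
    rcases Option.isSome_iff_exists.mp hs with ⟨q, hq⟩
    exact ⟨q.2, q, hq, rfl⟩
  · rintro ⟨v, r, hr, -⟩
    exact ⟨r, List.mem_of_find?_eq_some hr, List.find?_some (p := fun q : String × String => q.1 == k) hr⟩

-- frozenset canonicalisation is exact: equal canonical forms ↔ equal as sets
theorem pvFroz_eq_iff (a b : String) :
    (pvFroz a = pvFroz b) ↔
      PySem.Set.equal (PySem.Set.ofList (pvSplitComma a))
        (PySem.Set.ofList (pvSplitComma b)) = true := by
  rw [pvFroz, pvFroz, PySem.List.sorted_id_eq_sorted_id_iff_perm,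
    List.perm_ext_iff_of_nodup (PySem.Set.nodup_ofList _) (PySem.Set.nodup_ofList _),
    ← PySem.Set.equal_iff]

-- membership in one round's signature set
theorem mem_pvSignatures (p : List (String × String)) (x : PvSig) :
    x ∈ pvSignatures p ↔
      (pvHas p "term" = true ∧ x = .term (pvGet p "db") ((pvGet p "term").getD "")) ∨
      (pvHas p "id" = true ∧ x = .ids (pvGet p "db") (pvFroz ((pvGet p "id").getD ""))) := by
  unfold pvSignatures
  split_ifs with h1 h2 h2 <;>
    simp [PySem.Set.empty, h1, h2]

-- membership in the accumulated set of all old rounds' signatures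
theorem mem_seen (used : List (List (String × String))) (s : PySem.Set PvSig) (x : PvSig) :
    x ∈ used.foldl (fun seen old => PySem.Set.update seen (pvSignatures old)) s ↔
      x ∈ s ∨ ∃ old ∈ used, x ∈ pvSignatures old := by
  induction used generalizing s with
  | nil => simp
  | cons o rest ih =>
    simp only [List.foldl_cons, ih, PySem.Set.mem_update, List.mem_cons]
    constructor
    · rintro ((h | h) | ⟨old, ho, hx⟩)
      · exact Or.inl h
      · exact Or.inr ⟨o, Or.inl rfl, h⟩
      · exact Or.inr ⟨old, Or.inr ho, hx⟩
    · rintro (h | ⟨old, (rfl | ho), hx⟩)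
      · exact Or.inl (Or.inl h)
      · exact Or.inl (Or.inr hx)
      · exact Or.inr ⟨old, ho, hx⟩

theorem is_duplicate_params_eq (new_params : List (String × String))
    (used_params : List (List (String × String))) :
    is_duplicate_params new_params used_params = is_duplicate_params_alt new_params used_params := by
  rw [is_duplicate_params, pvALoop_eq_any]
  rw [Bool.eq_iff_iff]
  simp only [is_duplicate_params_alt, Bool.not_eq_true', ← Bool.not_eq_true,
    PySem.Set.isdisjoint_iff, not_forall, not_not, List.any_eq_true, pvPredA,
    Bool.and_eq_true, Bool.or_eq_true, beq_iff_eq, mem_seen, mem_pvSignatures,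
    PySem.Set.empty, List.mem_nil_iff, false_or, exists_prop]
  constructor
  · rintro ⟨old, hold, hdb, hcase⟩
    rcases hcase with ⟨⟨hes, hterm⟩, heq⟩ | ⟨⟨hef, hid⟩, heq⟩
    · refine ⟨.term (pvGet new_params "db") ((pvGet new_params "term").getD ""),
        Or.inl ⟨hes, rfl⟩, old, hold, Or.inl ⟨hterm, ?_⟩⟩
      simp [hdb, heq]
    · refine ⟨.ids (pvGet new_params "db") (pvFroz ((pvGet new_params "id").getD "")),
        Or.inr ⟨hef, rfl⟩, old, hold, Or.inr ⟨hid, ?_⟩⟩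
      simp [hdb, (pvFroz_eq_iff _ _).mpr heq]
  · rintro ⟨x, hnew, old, hold, hx⟩
    rcases hnew with ⟨hes, rfl⟩ | ⟨hef, rfl⟩
    · rcases hx with ⟨hterm, h⟩ | ⟨_, h⟩
      · injection h with hdb ht
        refine ⟨old, hold, hdb, Or.inl ⟨⟨hes, hterm⟩, ?_⟩⟩
        rcases (pvHas_iff new_params "term").mp hes with ⟨v, hv⟩
        rcases (pvHas_iff old "term").mp hterm with ⟨w, hw⟩
        rw [hv, hw] at ht ⊢; simp_all
      · exact absurd h (by simp)
    · rcases hx with ⟨_, h⟩ | ⟨hid, h⟩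
      · exact absurd h (by simp)
      · injection h with hdb hids
        exact ⟨old, hold, hdb, Or.inr ⟨⟨hef, hid⟩, (pvFroz_eq_iff _ _).mp hids⟩⟩

-- ===== VERDICT (by name: the statement is the Claim_ definition above) =====
theorem is_duplicate_params_spec : Claim_equal_is_duplicate_params := by
  intro new_params used_params _
  exact is_duplicate_params_eq new_params used_params
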